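-- pv_equiv track=rewrite | github.com/tyfarnan/symstrate | arc_agi/arc_dsl.py | mirrorGrid
-- ===== SOURCE A (Python) =====
-- def renderGrid(structured):
--     """
--     Converts the processed, structured representation back into a standard raw 2D array output.
--     """
--     # If structured is a list of ((r, c), value), determine the bounding box.
--     if structured and isinstance(structured[0], tuple) and isinstance(structured[0][0], tuple):
--         rows = [pos[0] for pos, _ in structured]
--         cols = [pos[1] for pos, _ in structured]
--         min_r, max_r = min(rows), max(rows)
--         min_c, max_c = min(cols), max(cols)
--         grid = [[0 for _ in range(max_c - min_c + 1)] for _ in range(max_r - min_r + 1)]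
--         for (r, c), val in structured:
--             grid[r - min_r][c - min_c] = val
--         return grid
--     # Otherwise, assume it's already a 2D array.
--     if isinstance(structured, list) and all(isinstance(row, list) for row in structured):
--         return structured
--     return structured
--
-- def mirrorGrid(structured, axis='vertical'):
--     """
--     Generates a mirror image of one half of the grid, effectively reflecting it across the split axis.
--     """
--     grid = renderGrid(structured)
--     if axis == 'vertical':
--         mirrored = [list(reversed(row)) for row in grid]
--     elif axis == 'horizontal':
--         mirrored = list(reversed(grid))
--     else:
--         mirrored = grid
--     return mirrored
-- ===== SOURCE B (Python) =====
-- def mirrorGrid(structured, axis='vertical'):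
--     """
--     Mirror computed in one pass by direct reflected-index construction:
--     for the coordinate-list form each value is placed straight at its
--     reflected cell (no separate render-then-reverse step); for a 2D array
--     the mirrored grid is built by index arithmetic.
--     """
--     if structured and isinstance(structured[0], tuple) and isinstance(structured[0][0], tuple):
--         rows = [p[0] for p, _ in structured]
--         cols = [p[1] for p, _ in structured]
--         min_r, max_r = min(rows), max(rows)
--         min_c, max_c = min(cols), max(cols)
--         h, w = max_r - min_r + 1, max_c - min_c + 1
--         grid = [[0] * w for _ in range(h)]
--         for (r, c), val in structured:
--             i, j = r - min_r, c - min_c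
--             if axis == 'vertical':
--                 j = w - 1 - j
--             elif axis == 'horizontal':
--                 i = h - 1 - i
--             grid[i][j] = val
--         return grid
--     if not (isinstance(structured, list) and all(isinstance(row, list) for row in structured)):
--         return structured
--     if axis == 'vertical':
--         return [[row[len(row) - 1 - j] for j in range(len(row))] for row in structured]
--     if axis == 'horizontal':
--         n = len(structured)
--         return [structured[n - 1 - i] for i in range(n)]
--     return structured
-- ===== Notes on version B (the rewrite author's own statement) =====
-- stated objective: alternative
-- what changed: renderGrid is inlined and the mirror is fused into construction: coordinate lists place each value directly at its reflected cell in one pass, and for 2D arrays the mirrored grid is built by reflected-index arithmetic instead of reversal passes.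
import Mathlib
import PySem

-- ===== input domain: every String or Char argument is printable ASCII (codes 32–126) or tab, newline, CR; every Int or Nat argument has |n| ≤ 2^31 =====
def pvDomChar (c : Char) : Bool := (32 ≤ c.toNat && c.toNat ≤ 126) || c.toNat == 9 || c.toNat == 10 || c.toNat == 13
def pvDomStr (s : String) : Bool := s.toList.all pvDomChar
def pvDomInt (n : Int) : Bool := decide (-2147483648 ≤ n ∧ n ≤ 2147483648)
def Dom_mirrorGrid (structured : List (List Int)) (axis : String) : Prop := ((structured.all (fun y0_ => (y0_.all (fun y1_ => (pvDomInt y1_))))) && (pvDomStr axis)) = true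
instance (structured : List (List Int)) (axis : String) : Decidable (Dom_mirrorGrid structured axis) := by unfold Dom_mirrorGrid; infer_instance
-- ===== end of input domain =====

-- B fuses the mirror into construction (reflected-index writes) instead of A's render-then-reverse; objective: alternative.
-- ===== PORT A =====
-- renderGrid: for List (List Int) the first isinstance guard (tuple of tuple) is always false,
-- and the second guard (list of lists) is always true, so it returns the input unchanged.
def renderGridA (structured : List (List Int)) : List (List Int) := structured

def mirrorGrid (structured : List (List Int)) (axis : String) : List (List Int) :=
  let grid := renderGridA structured
  if axis == "vertical" then grid.map (fun row => row.reverse)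
  else if axis == "horizontal" then grid.reverse
  else grid

-- ===== PORT B =====
-- The coordinate-((r,c),val) branch of Source B is unreachable for List (List Int) (its guard is false),
-- and the 'not a list of lists' fall-through is also unreachable; only the 2D-array path is ported.
-- row[len(row)-1-j] / structured[n-1-i]: index is always in range, ported as getD.
def mirrorGrid_alt (structured : List (List Int)) (axis : String) : List (List Int) :=
  if axis == "vertical" then
    structured.map (fun row =>
      (List.range row.length).map (fun j => row.getD (row.length - 1 - j) 0))
  else if axis == "horizontal" then
    (List.range structured.length).map (fun i =>
      structured.getD (structured.length - 1 - i) ([] : List Int))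
  else structured

-- ===== PRECONDITION & SPEC =====
def Spec_mirrorGrid (structured : List (List Int)) (axis : String) (out : List (List Int)) : Prop := out = mirrorGrid_alt structured axis
instance (structured : List (List Int)) (axis : String) (out : List (List Int)) : Decidable (Spec_mirrorGrid structured axis out) := by unfold Spec_mirrorGrid; infer_instance

-- ===== CLAIM (what is proved, stated in full; the proofs are below) =====
def Claim_equal_mirrorGrid : Prop := ∀ (structured : List (List Int)) (axis : String), Dom_mirrorGrid structured axis → Spec_mirrorGrid structured axis (mirrorGrid structured axis)

-- ===== LEMMAS AND PROOFS =====

-- ===== VERDICT (by name: the statement is the Claim_ definition above) =====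
theorem pv_rev_eq_idx {α : Type} [Inhabited α] (l : List α) :
    l.reverse = (List.range l.length).map (fun j => l.getD (l.length - 1 - j) default) := by
  apply List.ext_getElem
  · simp
  · intro i h1 h2
    simp only [List.getElem_reverse, List.getElem_map, List.getElem_range]
    simp only [List.length_reverse] at h1
    rw [List.getD_eq_getElem l default (by omega)]

theorem mirrorGrid_spec : Claim_equal_mirrorGrid := by
  intro structured axis _
  unfold Spec_mirrorGrid mirrorGrid mirrorGrid_alt renderGridA
  by_cases hv : axis == "vertical"
  · simp only [hv, if_pos]
    exact List.map_congr_left (fun row _ => pv_rev_eq_idx row)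
  · by_cases hh : axis == "horizontal"
    · simp only [hv, hh, if_neg, if_pos, Bool.false_eq_true, not_false_iff]
      exact pv_rev_eq_idx structured
    · simp [hv, hh]
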